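-- pv_equiv track=rewrite | github.com/ati1monder/zalikKNU | zalik.py | divideIntoParagraphs
-- ===== SOURCE A (Python) =====
-- def divideIntoParagraphs(text):
--     lines = text.split('\n')
--
--     paragraphs = []
--     current_paragraph = ''
--
--     for line in lines:
--         if line.strip():
--             current_paragraph += line.strip() + ' '
--         else:
--             if current_paragraph.strip():
--                 paragraphs.append(current_paragraph.strip())
--                 current_paragraph = ''
--
--     if current_paragraph.strip():
--         paragraphs.append(current_paragraph.strip())
--
--     return paragraphs
-- ===== SOURCE B (Python) =====
-- from itertools import groupby
--
--
-- def divideIntoParagraphs(text):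
--     return [' '.join(line.strip() for line in run)
--             for nonblank, run in groupby(text.split('\n'),
--                                          key=lambda line: bool(line.strip()))
--             if nonblank]
-- ===== Notes on version B (the rewrite author's own statement) =====
-- stated objective: idiomatic
-- what changed: Replaces A's running accumulator string with explicit flush logic by itertools.groupby run-segmentation: split the lines into maximal blank/non-blank runs and space-join the stripped lines of each non-blank run.
import Mathlib
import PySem

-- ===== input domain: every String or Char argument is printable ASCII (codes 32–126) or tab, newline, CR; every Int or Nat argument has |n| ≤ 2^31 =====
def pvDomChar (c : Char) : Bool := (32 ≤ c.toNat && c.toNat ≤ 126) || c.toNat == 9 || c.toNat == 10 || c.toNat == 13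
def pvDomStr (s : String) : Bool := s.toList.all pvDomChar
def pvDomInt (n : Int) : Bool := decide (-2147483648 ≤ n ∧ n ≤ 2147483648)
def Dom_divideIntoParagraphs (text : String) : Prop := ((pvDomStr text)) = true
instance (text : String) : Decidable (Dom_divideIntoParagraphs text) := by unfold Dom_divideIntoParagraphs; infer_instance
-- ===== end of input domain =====

-- B replaces A's running accumulator string and flush logic with groupby-style
-- run-segmentation (join the stripped lines of each maximal non-blank run); idiomatic, same cost.

-- ===== PORT A =====
-- A's loop body: accumulate 'line.strip() + " "', flush the accumulator on a blank line
def aStep (st : List (List Char) × List Char) (line : List Char) :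
    List (List Char) × List Char :=
  if PySem.Chars.strip line ≠ [] then
    (st.1, st.2 ++ PySem.Chars.strip line ++ [' '])
  else
    if PySem.Chars.strip st.2 ≠ [] then (st.1 ++ [PySem.Chars.strip st.2], []) else st

-- A's trailing flush after the loop
def aFinish (st : List (List Char) × List Char) : List (List Char) :=
  if PySem.Chars.strip st.2 ≠ [] then st.1 ++ [PySem.Chars.strip st.2] else st.1

def divideIntoParagraphs (text : String) : List String :=
  let lines := PySem.Chars.splitOn text.toList ['\n']
  (aFinish (lines.foldl aStep ([], []))).map String.ofList

-- ===== PORT B =====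
def bNonblank (line : List Char) : Bool := !(PySem.Chars.strip line).isEmpty

-- groupby(lines, key=nonblank): each call consumes one maximal run;
-- a non-blank run yields ' '.join of its stripped lines, a blank run yields nothing
def bGo : List (List Char) → List (List Char)
  | [] => []
  | l :: ls =>
    if bNonblank l then
      PySem.Chars.join [' '] ((l :: ls.takeWhile bNonblank).map PySem.Chars.strip)
        :: bGo (ls.dropWhile bNonblank)
    else
      bGo (ls.dropWhile (fun x => !bNonblank x))
termination_by lines => lines.length
decreasing_by
  · simpa [List.length_cons] using Nat.lt_succ_of_le (List.length_dropWhile_le bNonblank ls)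
  · simpa [List.length_cons] using Nat.lt_succ_of_le (List.length_dropWhile_le (fun x => !bNonblank x) ls)

def divideIntoParagraphs_alt (text : String) : List String :=
  (bGo (PySem.Chars.splitOn text.toList ['\n'])).map String.ofList

-- ===== PRECONDITION & SPEC =====
def Spec_divideIntoParagraphs (text : String) (out : List String) : Prop := out = divideIntoParagraphs_alt text
instance (text : String) (out : List String) : Decidable (Spec_divideIntoParagraphs text out) := by unfold Spec_divideIntoParagraphs; infer_instance

-- ===== CLAIM (what is proved, stated in full; the proofs are below) =====
def Claim_equal_divideIntoParagraphs : Prop := ∀ (text : String), Dom_divideIntoParagraphs text → Spec_divideIntoParagraphs text (divideIntoParagraphs text)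

-- ===== LEMMAS AND PROOFS =====

-- "good" piece: nonempty, already stripped on both sides
def Good (p : List Char) : Prop :=
  p ≠ [] ∧ List.dropWhile PySem.Chars.isspace p = p ∧
    (List.dropWhile PySem.Chars.isspace p.reverse).reverse = p

theorem lstrip_append {p : List Char} (h0 : p ≠ [])
    (h : List.dropWhile PySem.Chars.isspace p = p) (xs : List Char) :
    List.dropWhile PySem.Chars.isspace (p ++ xs) = p ++ xs := by
  rw [List.dropWhile_append, h]
  simp [List.isEmpty_iff, h0]

theorem rstrip_append {p : List Char} (h0 : p ≠ [])
    (h : (List.dropWhile PySem.Chars.isspace p.reverse).reverse = p) (xs : List Char) :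
    (List.dropWhile PySem.Chars.isspace (xs ++ p).reverse).reverse = xs ++ p := by
  have h' : List.dropWhile PySem.Chars.isspace p.reverse = p.reverse := by
    have := congrArg List.reverse h
    simpa using this
  rw [List.reverse_append, List.dropWhile_append, h']
  simp [List.isEmpty_iff, h0]

theorem rstrip_space (xs : List Char) :
    (List.dropWhile PySem.Chars.isspace (xs ++ [' ']).reverse).reverse =
    (List.dropWhile PySem.Chars.isspace xs.reverse).reverse := by
  simp [PySem.Chars.isspace]

-- strip l is a good piece whenever it is nonempty
theorem dropWhile_head_false {A : Type} (p : A → Bool) (l : List A) (d : A) (ds : List A)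
    (he : List.dropWhile p l = d :: ds) : p d = false := by
  have w : List.dropWhile p l ≠ [] := by rw [he]; simp
  have hh := List.head_dropWhile_not p w
  have h2 : (List.dropWhile p l).head? = some d := by rw [he]; rfl
  rw [List.head?_eq_some_head w] at h2
  rw [Option.some_inj.mp h2] at hh
  exact hh

theorem strip_nil : PySem.Chars.strip [] = [] := rfl

theorem good_strip {l : List Char} (h0 : PySem.Chars.strip l ≠ []) :
    Good (PySem.Chars.strip l) := by
  unfold Good
  simp only [PySem.Chars.strip, PySem.Chars.lstrip, PySem.Chars.rstrip] at h0 ⊢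
  refine ⟨h0, ?_, ?_⟩
  · -- lstrip of the result is itself: its head is the (non-space) head of dropWhile isspace l
    rcases hd : List.dropWhile PySem.Chars.isspace l with _ | ⟨c, cs⟩
    · simp at h0 ⊢
    · have hc : PySem.Chars.isspace c = false := dropWhile_head_false _ _ _ _ hd
      -- the result is a prefix of c :: cs
      have hpre : (List.dropWhile PySem.Chars.isspace (c :: cs).reverse).reverse <+: (c :: cs) := by
        have hsuf := List.dropWhile_suffix (l := (c :: cs).reverse) PySem.Chars.isspace
        have := List.reverse_prefix.mpr (by simpa using hsuf)
        simpa using this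
      rcases hpre with ⟨t, ht⟩
      rcases he : (List.dropWhile PySem.Chars.isspace (c :: cs).reverse).reverse with _ | ⟨d, ds⟩
      · simp
      · rw [he] at ht
        have hdc : d = c := by
          have := congrArg (·.head?) ht
          simpa using this
        subst hdc
        simp [hc]
  · -- rstrip is idempotent
    rcases hd : List.dropWhile PySem.Chars.isspace l with _ | ⟨c, cs⟩
    · simp
    · rw [List.reverse_reverse]
      rcases he : List.dropWhile PySem.Chars.isspace (c :: cs).reverse with _ | ⟨d, ds⟩
      · simp
      · have hdns : PySem.Chars.isspace d = false := dropWhile_head_false _ _ _ _ he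
        simp [hdns]

theorem good_join {pieces : List (List Char)} (h0 : pieces ≠ [])
    (hg : ∀ p ∈ pieces, Good p) : Good (PySem.Chars.join [' '] pieces) := by
  induction pieces with
  | nil => exact absurd rfl h0
  | cons p ps ih =>
    rcases ps with _ | ⟨q, rest⟩
    · simpa [PySem.Chars.join_singleton] using hg p (by simp)
    · have hp : Good p := hg p (by simp)
      have hrest : Good (PySem.Chars.join [' '] (q :: rest)) :=
        ih (by simp) (fun x hx => hg x (by simp [hx]))
      rw [PySem.Chars.join_cons_cons]
      obtain ⟨hp0, hpl, hpr⟩ := hp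
      obtain ⟨hr0, hrl, hrr⟩ := hrest
      refine ⟨by simp [hp0], ?_, ?_⟩
      · rw [show p ++ [' '] ++ PySem.Chars.join [' '] (q :: rest)
             = p ++ ([' '] ++ PySem.Chars.join [' '] (q :: rest)) by simp]
        exact lstrip_append hp0 hpl _
      · rw [show p ++ [' '] ++ PySem.Chars.join [' '] (q :: rest)
             = (p ++ [' ']) ++ PySem.Chars.join [' '] (q :: rest) by simp]
        exact rstrip_append hr0 hrr _

-- the flat accumulator: each piece followed by one space
def flatP (acc : List (List Char)) : List Char := (acc.map (· ++ [' '])).flatten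

theorem flatP_eq_join_space {pieces : List (List Char)} (h0 : pieces ≠ []) :
    flatP pieces = PySem.Chars.join [' '] pieces ++ [' '] := by
  induction pieces with
  | nil => exact absurd rfl h0
  | cons p ps ih =>
    rcases ps with _ | ⟨q, rest⟩
    · simp [flatP, PySem.Chars.join_singleton]
    · rw [PySem.Chars.join_cons_cons]
      have := ih (by simp)
      simp only [flatP, List.map_cons, List.flatten_cons] at this ⊢
      rw [this]
      simp

theorem strip_flatP {pieces : List (List Char)} (h0 : pieces ≠ [])
    (hg : ∀ p ∈ pieces, Good p) :
    PySem.Chars.strip (flatP pieces) = PySem.Chars.join [' '] pieces := by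
  obtain ⟨hj0, hjl, hjr⟩ := good_join h0 hg
  rw [flatP_eq_join_space h0]
  unfold PySem.Chars.strip PySem.Chars.lstrip PySem.Chars.rstrip
  rw [lstrip_append hj0 hjl, rstrip_space, hjr]

theorem strip_flatP_ne {pieces : List (List Char)} (h0 : pieces ≠ [])
    (hg : ∀ p ∈ pieces, Good p) : PySem.Chars.strip (flatP pieces) ≠ [] := by
  rw [strip_flatP h0 hg]
  exact (good_join h0 hg).1

-- A's loop over a run of non-blank lines just extends the accumulator
theorem run_foldl (t : List (List Char)) (ht : ∀ x ∈ t, bNonblank x = true) :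
    ∀ (acc : List (List Char)) (ps : List (List Char)),
    List.foldl aStep (ps, flatP acc) t = (ps, flatP (acc ++ t.map PySem.Chars.strip)) := by
  induction t with
  | nil => intro acc ps; simp
  | cons x xs ih =>
    intro acc ps
    have hx : PySem.Chars.strip x ≠ [] := by
      have := ht x (by simp)
      simpa [bNonblank, List.isEmpty_iff] using this
    have hstep : aStep (ps, flatP acc) x = (ps, flatP (acc ++ [PySem.Chars.strip x])) := by
      simp [aStep, hx, flatP]
    rw [List.foldl_cons, hstep, ih (fun y hy => ht y (by simp [hy]))]
    simp

-- blank lines with an empty accumulator are no-ops for A's loop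
theorem blank_skip (ls : List (List Char)) (ps : List (List Char)) :
    List.foldl aStep (ps, []) (ls.dropWhile (fun x => !bNonblank x)) =
    List.foldl aStep (ps, []) ls := by
  induction ls with
  | nil => simp
  | cons l ls ih =>
    by_cases hl : bNonblank l = true
    · simp [hl]
    · have hl' : PySem.Chars.strip l = [] := by
        simpa [bNonblank, List.isEmpty_iff] using hl
      have : aStep (ps, []) l = (ps, []) := by
        simp [aStep, hl', strip_nil]
      simp [hl, List.foldl_cons, this, ih]

theorem main_lemma (lines : List (List Char)) :
    ∀ ps : List (List Char),
    aFinish (List.foldl aStep (ps, []) lines) = ps ++ bGo lines := by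
  induction lines using bGo.induct with
  | case1 => intro ps; simp [aFinish, strip_nil, bGo]
  | case2 l ls hl ih =>
    intro ps
    have hlne : PySem.Chars.strip l ≠ [] := by
      simpa [bNonblank, List.isEmpty_iff] using hl
    set t := ls.takeWhile bNonblank with hts
    set d := ls.dropWhile bNonblank with hds
    have hsplit : ls = t ++ d := (List.takeWhile_append_dropWhile).symm
    have hstep : aStep (ps, []) l = (ps, flatP [PySem.Chars.strip l]) := by
      simp [aStep, hlne, flatP]
    have hrun := run_foldl t (fun x hx => List.mem_takeWhile_imp hx)
      [PySem.Chars.strip l] ps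
    set pieces := (l :: t).map PySem.Chars.strip with hp
    have hpieces0 : pieces ≠ [] := by simp [hp]
    have hpiecesg : ∀ p ∈ pieces, Good p := by
      intro p hpm
      rw [hp] at hpm
      simp only [List.mem_map] at hpm
      obtain ⟨x, hx, rfl⟩ := hpm
      rcases List.mem_cons.mp hx with rfl | hx'
      · exact good_strip hlne
      · have := List.mem_takeWhile_imp hx'
        exact good_strip (by simpa [bNonblank, List.isEmpty_iff] using this)
    have hfold1 : List.foldl aStep (ps, []) (l :: ls) = List.foldl aStep (ps, flatP pieces) d := by
      rw [List.foldl_cons, hstep]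
      conv_lhs => rw [hsplit]
      rw [List.foldl_append, hrun]
      simp [hp]
    have hP := strip_flatP hpieces0 hpiecesg
    have hPne := strip_flatP_ne hpieces0 hpiecesg
    rw [bGo, if_pos hl, ← hts, ← hds]
    rcases hdd : d with _ | ⟨b, d'⟩
    · rw [hfold1, hdd, List.foldl_nil, aFinish, if_pos hPne, hP]
      simp [hp, bGo]
    · have hb : bNonblank b = false :=
        dropWhile_head_false bNonblank ls b d' (hds.symm.trans hdd)
      have hb' : PySem.Chars.strip b = [] := by
        simpa [bNonblank, List.isEmpty_iff] using hb
      have hstepb : aStep (ps, flatP pieces) b = (ps ++ [PySem.Chars.strip (flatP pieces)], []) := by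
        simp [aStep, hb', hPne]
      have hstepb0 : aStep (ps ++ [PySem.Chars.strip (flatP pieces)], []) b
          = (ps ++ [PySem.Chars.strip (flatP pieces)], []) := by
        simp [aStep, hb', strip_nil]
      have : aFinish (List.foldl aStep (ps, []) (l :: ls))
          = aFinish (List.foldl aStep (ps ++ [PySem.Chars.strip (flatP pieces)], []) d) := by
      -- the flush on b equals restarting on d = b :: d' with empty accumulator
        rw [hfold1, hdd, List.foldl_cons, hstepb, List.foldl_cons, hstepb0]
      rw [this, ih, hP]
      simp [hp, hdd]
  | case3 l ls hl ih =>
    intro ps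
    have hl' : PySem.Chars.strip l = [] := by
      simpa [bNonblank, List.isEmpty_iff] using (by simpa using hl : bNonblank l = false)
    have hstep : aStep (ps, []) l = (ps, []) := by
      simp [aStep, hl', strip_nil]
    rw [List.foldl_cons, hstep, ← blank_skip, ih, bGo, if_neg (by simpa using hl)]

-- ===== VERDICT (by name: the statement is the Claim_ definition above) =====
theorem divideIntoParagraphs_spec : Claim_equal_divideIntoParagraphs := by
  intro text _
  unfold Spec_divideIntoParagraphs
  show List.map String.ofList
      (aFinish (List.foldl aStep ([], []) (PySem.Chars.splitOn text.toList ['\n'])))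
      = divideIntoParagraphs_alt text
  rw [main_lemma _ []]
  simp [divideIntoParagraphs_alt]
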